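-- pv_equiv track=rewrite | github.com/hariom2509/AI-Autonomous-Code-Debugging-Agent | tools/code_graph_tool.py | trace_function
-- ===== SOURCE A (Python) =====
-- def trace_function(graph, function_name):
--
--     visited = []
--
--     stack = [function_name]
--
--     while stack:
--
--         current = stack.pop()
--
--         if current not in visited:
--
--             visited.append(current)
--
--             if current in graph:
--
--                 stack.extend(graph[current])
--
--     return visited
-- ===== SOURCE B (Python) =====
-- def trace_function(graph, function_name):
--     visited = []
--     frames = [[function_name]]
--     while frames:
--         frame = frames[-1]
--         if not frame:
--             frames.pop()
--             continue
--         node = frame.pop(0)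
--         if node not in visited:
--             visited.append(node)
--             if node in graph:
--                 frames.append(list(reversed(graph[node])))
--     return visited
-- ===== Notes on version B (the rewrite author's own statement) =====
-- stated objective: alternative
-- what changed: Replaced the flat re-push node stack (duplicates pushed, skipped on pop) with a stack of sibling frames that descends into a node's children immediately, emulating recursive DFS; children are pushed reversed so the visit order is identical.
import Mathlib
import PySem

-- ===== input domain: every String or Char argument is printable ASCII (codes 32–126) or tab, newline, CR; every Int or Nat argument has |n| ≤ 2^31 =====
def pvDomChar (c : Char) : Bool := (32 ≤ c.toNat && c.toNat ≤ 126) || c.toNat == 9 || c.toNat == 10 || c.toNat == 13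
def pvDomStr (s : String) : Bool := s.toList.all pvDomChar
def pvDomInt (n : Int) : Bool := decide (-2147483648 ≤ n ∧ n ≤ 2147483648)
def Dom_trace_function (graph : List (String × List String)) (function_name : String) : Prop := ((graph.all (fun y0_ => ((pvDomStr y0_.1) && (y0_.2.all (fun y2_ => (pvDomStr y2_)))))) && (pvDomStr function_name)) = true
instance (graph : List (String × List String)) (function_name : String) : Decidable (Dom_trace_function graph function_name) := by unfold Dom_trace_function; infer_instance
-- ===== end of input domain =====

-- B replaces A's flat re-push node stack by a stack of sibling frames emulating recursive DFS
-- (children reversed), an alternative decomposition with the same visit order.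


-- helpers the ports need for their termination measures
def pvVals (graph : List (String × List String)) : List String :=
  graph.flatMap (fun p => p.2)

-- termination measure: number of distinct yet-unvisited names among pending ++ values
def pvU (graph : List (String × List String)) (visited pending : List String) : Nat :=
  (((pending ++ pvVals graph).filter (fun x => !(visited.contains x))).toFinset).card

theorem pvLexLt {a a' b b' : Nat} (h1 : a' ≤ a) (h2 : b' < b) :
    Prod.Lex (· < ·) (· < ·) (a', b') (a, b) := by
  rcases Nat.lt_or_ge a' a with h | h
  · exact Prod.Lex.left _ _ h
  · have : a' = a := Nat.le_antisymm h1 h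
    subst this
    exact Prod.Lex.right _ h2

theorem pvU_le (graph : List (String × List String)) {visited visited' pending pending' : List String}
    (hv : ∀ x, x ∈ visited → x ∈ visited')
    (hp : ∀ x, x ∈ pending' → x ∈ pending) :
    pvU graph visited' pending' ≤ pvU graph visited pending := by
  apply Finset.card_le_card
  intro x hx
  simp only [List.mem_toFinset, List.mem_filter, List.mem_append, Bool.not_eq_eq_eq_not,
    Bool.not_true, List.contains_eq_mem, decide_eq_false_iff_not] at hx ⊢
  exact ⟨hx.1.imp (hp x) id, fun h => hx.2 (hv x h)⟩

theorem pvU_lt (graph : List (String × List String)) {visited pending pending' : List String} {c : String}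
    (hc : c ∈ pending) (hcv : c ∉ visited)
    (hp : ∀ x, x ∈ pending' → x ∈ pending ∨ x ∈ pvVals graph) :
    pvU graph (visited ++ [c]) pending' < pvU graph visited pending := by
  apply Finset.card_lt_card
  constructor
  · intro x hx
    simp only [List.mem_toFinset, List.mem_filter, List.mem_append, List.mem_singleton,
      Bool.not_eq_eq_eq_not, Bool.not_true, List.contains_eq_mem, decide_eq_false_iff_not] at hx ⊢
    have := hp x
    tauto
  · intro hsub
    have hcs : c ∈ ((pending ++ pvVals graph).filter (fun x => !(visited.contains x))).toFinset := by
      simp only [List.mem_toFinset, List.mem_filter, List.mem_append, Bool.not_eq_eq_eq_not,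
        Bool.not_true, List.contains_eq_mem, decide_eq_false_iff_not]
      exact ⟨Or.inl hc, hcv⟩
    have := hsub hcs
    simp only [List.mem_toFinset, List.mem_filter, List.mem_append, List.mem_singleton,
      Bool.not_eq_eq_eq_not, Bool.not_true, List.contains_eq_mem, decide_eq_false_iff_not] at this
    tauto

theorem pvLookup_sub (graph : List (String × List String)) {c : String} {ch : List String}
    (h : graph.lookup c = some ch) : ∀ x, x ∈ ch → x ∈ pvVals graph := by
  induction graph with
  | nil => simp [List.lookup] at h
  | cons p rest ih =>
    intro x hx
    rw [List.lookup] at h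
    cases hk : c == p.1 with
    | true =>
      rw [hk] at h
      simp only [Option.some.injEq] at h
      subst h
      simp only [pvVals, List.flatMap_cons, List.mem_append]
      exact Or.inl hx
    | false =>
      rw [hk] at h
      have := ih h x hx
      simp only [pvVals, List.flatMap_cons, List.mem_append] at this ⊢
      exact Or.inr this

-- ===== PORT A =====
-- A's loop: pop from the END of the node stack; `current in graph` / `graph[current]`
-- is assoc-list first-match lookup (List.lookup): the some/none match transliterates
-- the `if current in graph: stack.extend(graph[current])` guard.
def pvLoopA (graph : List (String × List String)) (visited stack : List String) : List String :=
  match h : stack.getLast? with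
  | none => visited
  | some current =>
    if hv : current ∈ visited then
      pvLoopA graph visited stack.dropLast
    else
      match hl : graph.lookup current with
      | some ch => pvLoopA graph (visited ++ [current]) (stack.dropLast ++ ch)
      | none => pvLoopA graph (visited ++ [current]) stack.dropLast
termination_by (pvU graph visited stack, stack.length)
decreasing_by
  · have hne : stack ≠ [] := by intro hnil; rw [hnil] at h; simp at h
    exact pvLexLt (pvU_le graph (fun x hx => hx) (fun x hx => List.mem_of_mem_dropLast hx))
      (by have h0 : stack.length ≠ 0 := fun h0 => hne (List.eq_nil_of_length_eq_zero h0)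
          rw [List.length_dropLast]; omega)
  · exact Prod.Lex.left _ _ (pvU_lt graph (List.mem_of_getLast? h) hv (fun x hx =>
      (List.mem_append.mp hx).imp (fun h2 => List.mem_of_mem_dropLast h2)
        (fun h2 => pvLookup_sub graph hl x h2)))
  · exact Prod.Lex.left _ _ (pvU_lt graph (List.mem_of_getLast? h) hv
      (fun x hx => Or.inl (List.mem_of_mem_dropLast hx)))

def trace_function (graph : List (String × List String)) (function_name : String) : List String :=
  pvLoopA graph [] [function_name]

-- ===== PORT B =====
-- B's loop: a stack of sibling frames; look at the LAST frame, drop it when exhausted,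
-- otherwise pop its FIRST node; a newly visited node pushes its reversed children as a new frame.
def pvLoopB (graph : List (String × List String)) (visited : List String) (frames : List (List String)) : List String :=
  match h : frames.getLast? with
  | none => visited
  | some [] => pvLoopB graph visited frames.dropLast
  | some (node :: frest) =>
    if hv : node ∈ visited then
      pvLoopB graph visited (frames.dropLast ++ [frest])
    else
      match hl : graph.lookup node with
      | some ch => pvLoopB graph (visited ++ [node]) ((frames.dropLast ++ [frest]) ++ [ch.reverse])
      | none => pvLoopB graph (visited ++ [node]) (frames.dropLast ++ [frest])
termination_by (pvU graph visited frames.flatten, frames.flatten.length + frames.length)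
decreasing_by
  · have hfr : frames = frames.dropLast ++ [([] : List String)] :=
      (List.dropLast_append_getLast? _ h).symm
    refine pvLexLt (pvU_le graph (fun x hx => hx) (fun x hx => ?_)) ?_
    · rw [hfr]
      simpa using hx
    · conv_rhs => rw [hfr]
      simp
  · have hfr : frames = frames.dropLast ++ [node :: frest] :=
      (List.dropLast_append_getLast? _ h).symm
    refine pvLexLt (pvU_le graph (fun x hx => hx) (fun x hx => ?_)) ?_
    · rw [hfr]
      simp only [List.flatten_append, List.flatten_cons, List.flatten_nil, List.append_nil,
        List.mem_append] at hx ⊢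
      exact hx.imp id (fun hx2 => List.mem_cons_of_mem _ hx2)
    · conv_rhs => rw [hfr]
      simp [List.length_append]
  · have hfr : frames = frames.dropLast ++ [node :: frest] :=
      (List.dropLast_append_getLast? _ h).symm
    have hc : node ∈ frames.flatten := by rw [hfr]; simp
    refine Prod.Lex.left _ _ (pvU_lt graph hc hv (fun x hx => ?_))
    rw [hfr]
    simp only [List.flatten_append, List.flatten_cons, List.flatten_nil, List.append_nil,
      List.mem_append, List.mem_reverse] at hx ⊢
    rcases hx with (hx | hx) | hx
    · exact Or.inl (Or.inl hx)
    · exact Or.inl (Or.inr (List.mem_cons_of_mem _ hx))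
    · exact Or.inr (pvLookup_sub graph hl x hx)
  · have hfr : frames = frames.dropLast ++ [node :: frest] :=
      (List.dropLast_append_getLast? _ h).symm
    have hc : node ∈ frames.flatten := by rw [hfr]; simp
    refine Prod.Lex.left _ _ (pvU_lt graph hc hv (fun x hx => ?_))
    rw [hfr]
    simp only [List.flatten_append, List.flatten_cons, List.flatten_nil, List.append_nil,
      List.mem_append] at hx ⊢
    exact Or.inl (hx.imp id (fun hx2 => List.mem_cons_of_mem _ hx2))

def trace_function_alt (graph : List (String × List String)) (function_name : String) : List String :=
  pvLoopB graph [] [[function_name]]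

-- ===== PRECONDITION & SPEC =====
def Spec_trace_function (graph : List (String × List String)) (function_name : String) (out : List String) : Prop := out = trace_function_alt graph function_name
instance (graph : List (String × List String)) (function_name : String) (out : List String) : Decidable (Spec_trace_function graph function_name out) := by unfold Spec_trace_function; infer_instance

-- ===== CLAIM (what is proved, stated in full; the proofs are below) =====
def Claim_equal_trace_function : Prop := ∀ (graph : List (String × List String)) (function_name : String), Dom_trace_function graph function_name → Spec_trace_function graph function_name (trace_function graph function_name)

-- ===== LEMMAS AND PROOFS =====

-- common reference loop: head-pop worklist DFS; both ports are proved equal to it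
def pvLoopH (graph : List (String × List String)) (visited pending : List String) : List String :=
  match pending with
  | [] => visited
  | n :: rest =>
    if hv : n ∈ visited then
      pvLoopH graph visited rest
    else
      match hl : graph.lookup n with
      | some ch => pvLoopH graph (visited ++ [n]) (ch.reverse ++ rest)
      | none => pvLoopH graph (visited ++ [n]) rest
termination_by (pvU graph visited pending, pending.length)
decreasing_by
  · exact pvLexLt (pvU_le graph (fun x hx => hx) (fun x hx => List.mem_cons_of_mem _ hx))
      (by simp)
  · refine Prod.Lex.left _ _ (pvU_lt graph List.mem_cons_self hv (fun x hx => ?_))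
    simp only [List.mem_append, List.mem_reverse] at hx
    rcases hx with hx | hx
    · exact Or.inr (pvLookup_sub graph hl x hx)
    · exact Or.inl (List.mem_cons_of_mem _ hx)
  · exact Prod.Lex.left _ _ (pvU_lt graph List.mem_cons_self hv
      (fun x hx => Or.inl (List.mem_cons_of_mem _ hx)))

theorem pvLoopA_eq_H (graph : List (String × List String)) (visited stack : List String) :
    pvLoopA graph visited stack = pvLoopH graph visited stack.reverse := by
  fun_induction pvLoopA graph visited stack with
  | case1 visited stack h =>
    rw [List.getLast?_eq_none_iff] at h
    rw [h, List.reverse_nil, pvLoopH]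
  | case2 visited stack current h hv ih =>
    have hfr : stack = stack.dropLast ++ [current] := (List.dropLast_append_getLast? _ h).symm
    rw [ih]
    conv_rhs => rw [hfr, List.reverse_append, List.reverse_singleton, List.singleton_append,
      pvLoopH]
    rw [dif_pos hv]
  | case3 visited stack current h hv ch hl ih =>
    have hfr : stack = stack.dropLast ++ [current] := (List.dropLast_append_getLast? _ h).symm
    rw [ih]
    conv_rhs => rw [hfr, List.reverse_append, List.reverse_singleton, List.singleton_append,
      pvLoopH]
    rw [dif_neg hv, hl, List.reverse_append]
  | case4 visited stack current h hv hl ih =>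
    have hfr : stack = stack.dropLast ++ [current] := (List.dropLast_append_getLast? _ h).symm
    rw [ih]
    conv_rhs => rw [hfr, List.reverse_append, List.reverse_singleton, List.singleton_append,
      pvLoopH]
    rw [dif_neg hv, hl]

theorem pvLoopB_eq_H (graph : List (String × List String)) (visited : List String) (frames : List (List String)) :
    pvLoopB graph visited frames = pvLoopH graph visited frames.reverse.flatten := by
  fun_induction pvLoopB graph visited frames with
  | case1 visited frames h =>
    rw [List.getLast?_eq_none_iff] at h
    rw [h, List.reverse_nil, List.flatten_nil, pvLoopH]
  | case2 visited frames h ih =>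
    have hfr : frames = frames.dropLast ++ [([] : List String)] :=
      (List.dropLast_append_getLast? _ h).symm
    rw [ih]
    conv_rhs => rw [hfr]
    simp
  | case3 visited frames node frest h hv ih =>
    have hfr : frames = frames.dropLast ++ [node :: frest] :=
      (List.dropLast_append_getLast? _ h).symm
    rw [ih]
    conv_rhs => rw [hfr]
    simp only [List.reverse_append, List.reverse_singleton, List.singleton_append,
      List.flatten_cons, List.cons_append]
    conv_rhs => rw [pvLoopH]
    rw [dif_pos hv]
  | case4 visited frames node frest h hv ch hl ih =>
    have hfr : frames = frames.dropLast ++ [node :: frest] :=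
      (List.dropLast_append_getLast? _ h).symm
    rw [ih]
    conv_rhs => rw [hfr]
    simp only [List.reverse_append, List.reverse_singleton, List.singleton_append,
      List.flatten_cons, List.cons_append]
    conv_rhs => rw [pvLoopH]
    rw [dif_neg hv, hl]
    simp
  | case5 visited frames node frest h hv hl ih =>
    have hfr : frames = frames.dropLast ++ [node :: frest] :=
      (List.dropLast_append_getLast? _ h).symm
    rw [ih]
    conv_rhs => rw [hfr]
    simp only [List.reverse_append, List.reverse_singleton, List.singleton_append,
      List.flatten_cons, List.cons_append]
    conv_rhs => rw [pvLoopH]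
    rw [dif_neg hv, hl]

-- ===== VERDICT (by name: the statement is the Claim_ definition above) =====
theorem trace_function_spec : Claim_equal_trace_function := by
  intro graph function_name _
  unfold Spec_trace_function trace_function trace_function_alt
  rw [pvLoopA_eq_H, pvLoopB_eq_H]
  simp
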